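-- pv_equiv track=rewrite | github.com/ShaheenKhanDr/DataBases_and_Models_Youtube | PYTHON_PROJECTS/Django_Project/WebApplication2/app2.py | find_remedy
-- ===== SOURCE A (Python) =====
-- def find_remedy(selected_symptoms):
--     remedies = {
--         "ignatia amara": {"acute", "depression", "constant", "sadness", "weeping spells", "isolation",
--                           "deep thoughts", "irritability", "dull mind", "weak memory", "excessive weakness",
--                           "acute grief", "broken relationships", "life disappointments", "bipolar disorder"},
--         "natrum mur": {"sensitive individuals", "sporadic episodes", "weeping",
--                        "absorbed in grief", "dwelling on painful memories",
--                        "do not like consolation", "worsens complaints", "easy offender",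
--                        "lacks interest in work", "managing depression",
--                        "women before menstruation"},
--         "aurum met": {"extreme sadness", "hopelessness", "constant suicidal thoughts", "feeling worthless",
--                       "negative thoughts", "dark future perception", "life as a burden"},
--         "kali phos": {"over-stressed", "anxious", "constant sadness", "negative thoughts", "reduce mental",
--                       "physical exhaustion", "anxiety attacks", "weeping spells", "sleeplessness"},
--         "natrum sulph": {"overwhelming suicidal thoughts", "sadness", "weeping", "irritability", "morning sadness",
--                          "aversion to talking", "indifference towards family", "frequent thoughts to end life",
--                          "confusion", "difficulty in thinking"},
--         "sepia": {"menopause depression", "sadness", "aversion to family", "loss of interest in work",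
--                   "indifferent behavior towards life and family", "constant worry and stress", "irritation",
--                   "easy offending", "sporadic weeping spells", "seeking consolation and sympathy",
--                   "loss of sexual desire", "depression triggered after childbirth"},
--         "cimicifuga racemosa": {"post-childbirth depression", "extreme sadness", "darkness symptoms", "exhaustion",
--                                 "excessive talking", "indifferent behavior", "fear of death", "fear of mental insanity"},
--         "lachesis": {"depression with delusion", "psychotic depression", "sadness", "feelings of abandonment",
--                      "excessive talkativeness", "delusions", "frequent switching of subjects", "violent anger",
--                      "madness", "delusions causing suspicion", "fear of harm", "restlessness", "aversion to work",
--                      "evasion from the world"},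
--         "coffea crude": {"manages sleeplessness", "constant thoughts leading to sleeplessness", "nighttime restlessness",
--                          "tossing and turning", "mood changes", "irritability", "anxiety", "weeping", "weakness"},
--         "arsenic album": {"anxiety and sadness", "accompany sadness", "anxiety about health and future",
--                           "intense restlessness", "marked weakness", "fears of disease", "financial loss",
--                           "loneliness", "death"}
--     }
--
--     selected_symptoms_set = set(selected_symptoms)
--     best_match = None
--     max_matches = 0
--
--     for remedy, symptoms in remedies.items():
--         matches = len(selected_symptoms_set.intersection(symptoms))
--         if matches > max_matches:
--             max_matches = matches
--             best_match = remedy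
--
--     return best_match if best_match else "Remedy not found for the given signs and symptoms."
-- ===== SOURCE B (Python) =====
-- # Flat (symptom, remedy) table + membership filter + per-remedy count scan.
--
-- SYMPTOM_TABLE = [
--     ('acute', 'ignatia amara'),
--     ('depression', 'ignatia amara'),
--     ('constant', 'ignatia amara'),
--     ('sadness', 'ignatia amara'),
--     ('weeping spells', 'ignatia amara'),
--     ('isolation', 'ignatia amara'),
--     ('deep thoughts', 'ignatia amara'),
--     ('irritability', 'ignatia amara'),
--     ('dull mind', 'ignatia amara'),
--     ('weak memory', 'ignatia amara'),
--     ('excessive weakness', 'ignatia amara'),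
--     ('acute grief', 'ignatia amara'),
--     ('broken relationships', 'ignatia amara'),
--     ('life disappointments', 'ignatia amara'),
--     ('bipolar disorder', 'ignatia amara'),
--     ('sensitive individuals', 'natrum mur'),
--     ('sporadic episodes', 'natrum mur'),
--     ('weeping', 'natrum mur'),
--     ('absorbed in grief', 'natrum mur'),
--     ('dwelling on painful memories', 'natrum mur'),
--     ('do not like consolation', 'natrum mur'),
--     ('worsens complaints', 'natrum mur'),
--     ('easy offender', 'natrum mur'),
--     ('lacks interest in work', 'natrum mur'),
--     ('managing depression', 'natrum mur'),
--     ('women before menstruation', 'natrum mur'),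
--     ('extreme sadness', 'aurum met'),
--     ('hopelessness', 'aurum met'),
--     ('constant suicidal thoughts', 'aurum met'),
--     ('feeling worthless', 'aurum met'),
--     ('negative thoughts', 'aurum met'),
--     ('dark future perception', 'aurum met'),
--     ('life as a burden', 'aurum met'),
--     ('over-stressed', 'kali phos'),
--     ('anxious', 'kali phos'),
--     ('constant sadness', 'kali phos'),
--     ('negative thoughts', 'kali phos'),
--     ('reduce mental', 'kali phos'),
--     ('physical exhaustion', 'kali phos'),
--     ('anxiety attacks', 'kali phos'),
--     ('weeping spells', 'kali phos'),
--     ('sleeplessness', 'kali phos'),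
--     ('overwhelming suicidal thoughts', 'natrum sulph'),
--     ('sadness', 'natrum sulph'),
--     ('weeping', 'natrum sulph'),
--     ('irritability', 'natrum sulph'),
--     ('morning sadness', 'natrum sulph'),
--     ('aversion to talking', 'natrum sulph'),
--     ('indifference towards family', 'natrum sulph'),
--     ('frequent thoughts to end life', 'natrum sulph'),
--     ('confusion', 'natrum sulph'),
--     ('difficulty in thinking', 'natrum sulph'),
--     ('menopause depression', 'sepia'),
--     ('sadness', 'sepia'),
--     ('aversion to family', 'sepia'),
--     ('loss of interest in work', 'sepia'),
--     ('indifferent behavior towards life and family', 'sepia'),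
--     ('constant worry and stress', 'sepia'),
--     ('irritation', 'sepia'),
--     ('easy offending', 'sepia'),
--     ('sporadic weeping spells', 'sepia'),
--     ('seeking consolation and sympathy', 'sepia'),
--     ('loss of sexual desire', 'sepia'),
--     ('depression triggered after childbirth', 'sepia'),
--     ('post-childbirth depression', 'cimicifuga racemosa'),
--     ('extreme sadness', 'cimicifuga racemosa'),
--     ('darkness symptoms', 'cimicifuga racemosa'),
--     ('exhaustion', 'cimicifuga racemosa'),
--     ('excessive talking', 'cimicifuga racemosa'),
--     ('indifferent behavior', 'cimicifuga racemosa'),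
--     ('fear of death', 'cimicifuga racemosa'),
--     ('fear of mental insanity', 'cimicifuga racemosa'),
--     ('depression with delusion', 'lachesis'),
--     ('psychotic depression', 'lachesis'),
--     ('sadness', 'lachesis'),
--     ('feelings of abandonment', 'lachesis'),
--     ('excessive talkativeness', 'lachesis'),
--     ('delusions', 'lachesis'),
--     ('frequent switching of subjects', 'lachesis'),
--     ('violent anger', 'lachesis'),
--     ('madness', 'lachesis'),
--     ('delusions causing suspicion', 'lachesis'),
--     ('fear of harm', 'lachesis'),
--     ('restlessness', 'lachesis'),
--     ('aversion to work', 'lachesis'),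
--     ('evasion from the world', 'lachesis'),
--     ('manages sleeplessness', 'coffea crude'),
--     ('constant thoughts leading to sleeplessness', 'coffea crude'),
--     ('nighttime restlessness', 'coffea crude'),
--     ('tossing and turning', 'coffea crude'),
--     ('mood changes', 'coffea crude'),
--     ('irritability', 'coffea crude'),
--     ('anxiety', 'coffea crude'),
--     ('weeping', 'coffea crude'),
--     ('weakness', 'coffea crude'),
--     ('anxiety and sadness', 'arsenic album'),
--     ('accompany sadness', 'arsenic album'),
--     ('anxiety about health and future', 'arsenic album'),
--     ('intense restlessness', 'arsenic album'),
--     ('marked weakness', 'arsenic album'),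
--     ('fears of disease', 'arsenic album'),
--     ('financial loss', 'arsenic album'),
--     ('loneliness', 'arsenic album'),
--     ('death', 'arsenic album'),
-- ]
--
-- REMEDY_ORDER = ['ignatia amara', 'natrum mur', 'aurum met', 'kali phos', 'natrum sulph', 'sepia', 'cimicifuga racemosa', 'lachesis', 'coffea crude', 'arsenic album']
--
--
--
-- def _scan(hits, names, best, best_n):
--     if not names:
--         return best
--     n = hits.count(names[0])
--     if n > best_n:
--         return _scan(hits, names[1:], names[0], n)
--     return _scan(hits, names[1:], best, best_n)
--
--
-- def find_remedy(selected_symptoms):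
--     chosen = set(selected_symptoms)
--     hits = [pair[1] for pair in SYMPTOM_TABLE if pair[0] in chosen]
--     return _scan(hits, REMEDY_ORDER,
--                  "Remedy not found for the given signs and symptoms.", 0)
-- ===== Notes on version B (the rewrite author's own statement) =====
-- stated objective: alternative
-- what changed: Replaces the per-remedy set-intersection fold over a remedy->symptom-set dict with a flat (symptom, remedy) pair table: one membership filter over the table yields a hit list, and a recursive scan over the remedy-name list counts each remedy's hits with the same strict-> first-wins rule.
import Mathlib
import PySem

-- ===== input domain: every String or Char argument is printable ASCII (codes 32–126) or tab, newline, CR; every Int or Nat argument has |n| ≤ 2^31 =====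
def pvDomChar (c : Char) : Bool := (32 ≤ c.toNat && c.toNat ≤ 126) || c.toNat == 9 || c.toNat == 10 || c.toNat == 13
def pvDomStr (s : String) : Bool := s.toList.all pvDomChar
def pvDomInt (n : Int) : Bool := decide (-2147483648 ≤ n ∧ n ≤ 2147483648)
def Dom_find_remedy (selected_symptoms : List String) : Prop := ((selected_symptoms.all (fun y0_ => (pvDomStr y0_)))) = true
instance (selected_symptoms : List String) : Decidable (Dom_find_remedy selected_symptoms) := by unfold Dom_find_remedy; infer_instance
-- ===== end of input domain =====

-- B replaces the per-remedy set-intersection fold with a flat (symptom, remedy) table: one membership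
-- filter over the table produces the hit list, then a recursive scan counts each remedy's hits in dict order
-- with the same strict-> first-wins rule (objective: alternative decomposition, same observable result).

-- ===== PORT A =====
-- A-side helper: the literal remedies dict (remedy -> set of symptoms), insertion order.
def pvRemediesA : List (String × PySem.Set String) := [
  ("ignatia amara", PySem.Set.ofList ["acute", "depression", "constant", "sadness", "weeping spells", "isolation", "deep thoughts", "irritability", "dull mind", "weak memory", "excessive weakness", "acute grief", "broken relationships", "life disappointments", "bipolar disorder"]),
  ("natrum mur", PySem.Set.ofList ["sensitive individuals", "sporadic episodes", "weeping", "absorbed in grief", "dwelling on painful memories", "do not like consolation", "worsens complaints", "easy offender", "lacks interest in work", "managing depression", "women before menstruation"]),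
  ("aurum met", PySem.Set.ofList ["extreme sadness", "hopelessness", "constant suicidal thoughts", "feeling worthless", "negative thoughts", "dark future perception", "life as a burden"]),
  ("kali phos", PySem.Set.ofList ["over-stressed", "anxious", "constant sadness", "negative thoughts", "reduce mental", "physical exhaustion", "anxiety attacks", "weeping spells", "sleeplessness"]),
  ("natrum sulph", PySem.Set.ofList ["overwhelming suicidal thoughts", "sadness", "weeping", "irritability", "morning sadness", "aversion to talking", "indifference towards family", "frequent thoughts to end life", "confusion", "difficulty in thinking"]),
  ("sepia", PySem.Set.ofList ["menopause depression", "sadness", "aversion to family", "loss of interest in work", "indifferent behavior towards life and family", "constant worry and stress", "irritation", "easy offending", "sporadic weeping spells", "seeking consolation and sympathy", "loss of sexual desire", "depression triggered after childbirth"]),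
  ("cimicifuga racemosa", PySem.Set.ofList ["post-childbirth depression", "extreme sadness", "darkness symptoms", "exhaustion", "excessive talking", "indifferent behavior", "fear of death", "fear of mental insanity"]),
  ("lachesis", PySem.Set.ofList ["depression with delusion", "psychotic depression", "sadness", "feelings of abandonment", "excessive talkativeness", "delusions", "frequent switching of subjects", "violent anger", "madness", "delusions causing suspicion", "fear of harm", "restlessness", "aversion to work", "evasion from the world"]),
  ("coffea crude", PySem.Set.ofList ["manages sleeplessness", "constant thoughts leading to sleeplessness", "nighttime restlessness", "tossing and turning", "mood changes", "irritability", "anxiety", "weeping", "weakness"]),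
  ("arsenic album", PySem.Set.ofList ["anxiety and sadness", "accompany sadness", "anxiety about health and future", "intense restlessness", "marked weakness", "fears of disease", "financial loss", "loneliness", "death"])]

def find_remedy (selected_symptoms : List String) : String :=
  let selected_symptoms_set : PySem.Set String := PySem.Set.ofList selected_symptoms
  let r := pvRemediesA.foldl
    (fun (acc : Option String × Int) p =>
      let mtch := PySem.Set.len (PySem.Set.inter selected_symptoms_set p.2)
      if mtch > acc.2 then (some p.1, mtch) else acc)
    (none, 0)
  -- 'best_match if best_match else ...': remedy names are nonempty strings, so truthiness = is-some
  match r.1 with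
  | some best => best
  | none => "Remedy not found for the given signs and symptoms."

-- ===== PORT B =====
-- B-side data: the flat (symptom, remedy) table and the remedy names in dict order.
def pvTable : List (String × String) := [
  ("acute", "ignatia amara"),
  ("depression", "ignatia amara"),
  ("constant", "ignatia amara"),
  ("sadness", "ignatia amara"),
  ("weeping spells", "ignatia amara"),
  ("isolation", "ignatia amara"),
  ("deep thoughts", "ignatia amara"),
  ("irritability", "ignatia amara"),
  ("dull mind", "ignatia amara"),
  ("weak memory", "ignatia amara"),
  ("excessive weakness", "ignatia amara"),
  ("acute grief", "ignatia amara"),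
  ("broken relationships", "ignatia amara"),
  ("life disappointments", "ignatia amara"),
  ("bipolar disorder", "ignatia amara"),
  ("sensitive individuals", "natrum mur"),
  ("sporadic episodes", "natrum mur"),
  ("weeping", "natrum mur"),
  ("absorbed in grief", "natrum mur"),
  ("dwelling on painful memories", "natrum mur"),
  ("do not like consolation", "natrum mur"),
  ("worsens complaints", "natrum mur"),
  ("easy offender", "natrum mur"),
  ("lacks interest in work", "natrum mur"),
  ("managing depression", "natrum mur"),
  ("women before menstruation", "natrum mur"),
  ("extreme sadness", "aurum met"),
  ("hopelessness", "aurum met"),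
  ("constant suicidal thoughts", "aurum met"),
  ("feeling worthless", "aurum met"),
  ("negative thoughts", "aurum met"),
  ("dark future perception", "aurum met"),
  ("life as a burden", "aurum met"),
  ("over-stressed", "kali phos"),
  ("anxious", "kali phos"),
  ("constant sadness", "kali phos"),
  ("negative thoughts", "kali phos"),
  ("reduce mental", "kali phos"),
  ("physical exhaustion", "kali phos"),
  ("anxiety attacks", "kali phos"),
  ("weeping spells", "kali phos"),
  ("sleeplessness", "kali phos"),
  ("overwhelming suicidal thoughts", "natrum sulph"),
  ("sadness", "natrum sulph"),
  ("weeping", "natrum sulph"),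
  ("irritability", "natrum sulph"),
  ("morning sadness", "natrum sulph"),
  ("aversion to talking", "natrum sulph"),
  ("indifference towards family", "natrum sulph"),
  ("frequent thoughts to end life", "natrum sulph"),
  ("confusion", "natrum sulph"),
  ("difficulty in thinking", "natrum sulph"),
  ("menopause depression", "sepia"),
  ("sadness", "sepia"),
  ("aversion to family", "sepia"),
  ("loss of interest in work", "sepia"),
  ("indifferent behavior towards life and family", "sepia"),
  ("constant worry and stress", "sepia"),
  ("irritation", "sepia"),
  ("easy offending", "sepia"),
  ("sporadic weeping spells", "sepia"),
  ("seeking consolation and sympathy", "sepia"),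
  ("loss of sexual desire", "sepia"),
  ("depression triggered after childbirth", "sepia"),
  ("post-childbirth depression", "cimicifuga racemosa"),
  ("extreme sadness", "cimicifuga racemosa"),
  ("darkness symptoms", "cimicifuga racemosa"),
  ("exhaustion", "cimicifuga racemosa"),
  ("excessive talking", "cimicifuga racemosa"),
  ("indifferent behavior", "cimicifuga racemosa"),
  ("fear of death", "cimicifuga racemosa"),
  ("fear of mental insanity", "cimicifuga racemosa"),
  ("depression with delusion", "lachesis"),
  ("psychotic depression", "lachesis"),
  ("sadness", "lachesis"),
  ("feelings of abandonment", "lachesis"),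
  ("excessive talkativeness", "lachesis"),
  ("delusions", "lachesis"),
  ("frequent switching of subjects", "lachesis"),
  ("violent anger", "lachesis"),
  ("madness", "lachesis"),
  ("delusions causing suspicion", "lachesis"),
  ("fear of harm", "lachesis"),
  ("restlessness", "lachesis"),
  ("aversion to work", "lachesis"),
  ("evasion from the world", "lachesis"),
  ("manages sleeplessness", "coffea crude"),
  ("constant thoughts leading to sleeplessness", "coffea crude"),
  ("nighttime restlessness", "coffea crude"),
  ("tossing and turning", "coffea crude"),
  ("mood changes", "coffea crude"),
  ("irritability", "coffea crude"),
  ("anxiety", "coffea crude"),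
  ("weeping", "coffea crude"),
  ("weakness", "coffea crude"),
  ("anxiety and sadness", "arsenic album"),
  ("accompany sadness", "arsenic album"),
  ("anxiety about health and future", "arsenic album"),
  ("intense restlessness", "arsenic album"),
  ("marked weakness", "arsenic album"),
  ("fears of disease", "arsenic album"),
  ("financial loss", "arsenic album"),
  ("loneliness", "arsenic album"),
  ("death", "arsenic album")]

def pvOrder : List String := ["ignatia amara", "natrum mur", "aurum met", "kali phos", "natrum sulph", "sepia", "cimicifuga racemosa", "lachesis", "coffea crude", "arsenic album"]

-- B-side helper: the recursive scan '_scan(hits, names, best, best_n)' of Source B.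
def pvScanB (hits : List String) : List String → String → Int → String
  | [], best, _ => best
  | name :: rest, best, best_n =>
    let n : Int := (PySem.List.count hits name : Int)
    if n > best_n then pvScanB hits rest name n else pvScanB hits rest best best_n

def find_remedy_alt (selected_symptoms : List String) : String :=
  let chosen : PySem.Set String := PySem.Set.ofList selected_symptoms
  let hits := (pvTable.filter (fun pair => PySem.Set.contains chosen pair.1)).map (fun pair => pair.2)
  pvScanB hits pvOrder "Remedy not found for the given signs and symptoms." 0

-- ===== PRECONDITION & SPEC =====
def Spec_find_remedy (selected_symptoms : List String) (out : String) : Prop := out = find_remedy_alt selected_symptoms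
instance (selected_symptoms : List String) (out : String) : Decidable (Spec_find_remedy selected_symptoms out) := by unfold Spec_find_remedy; infer_instance

-- ===== CLAIM (what is proved, stated in full; the proofs are below) =====
def Claim_equal_find_remedy : Prop := ∀ (selected_symptoms : List String), Dom_find_remedy selected_symptoms → Spec_find_remedy selected_symptoms (find_remedy selected_symptoms)

-- ===== LEMMAS AND PROOFS =====
-- proof-only helper: the remedies as remedy -> list of symptoms (ties the three data constants together)
def pvRemediesB : List (String × List String) := [
  ("ignatia amara", ["acute", "depression", "constant", "sadness", "weeping spells", "isolation", "deep thoughts", "irritability", "dull mind", "weak memory", "excessive weakness", "acute grief", "broken relationships", "life disappointments", "bipolar disorder"]),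
  ("natrum mur", ["sensitive individuals", "sporadic episodes", "weeping", "absorbed in grief", "dwelling on painful memories", "do not like consolation", "worsens complaints", "easy offender", "lacks interest in work", "managing depression", "women before menstruation"]),
  ("aurum met", ["extreme sadness", "hopelessness", "constant suicidal thoughts", "feeling worthless", "negative thoughts", "dark future perception", "life as a burden"]),
  ("kali phos", ["over-stressed", "anxious", "constant sadness", "negative thoughts", "reduce mental", "physical exhaustion", "anxiety attacks", "weeping spells", "sleeplessness"]),
  ("natrum sulph", ["overwhelming suicidal thoughts", "sadness", "weeping", "irritability", "morning sadness", "aversion to talking", "indifference towards family", "frequent thoughts to end life", "confusion", "difficulty in thinking"]),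
  ("sepia", ["menopause depression", "sadness", "aversion to family", "loss of interest in work", "indifferent behavior towards life and family", "constant worry and stress", "irritation", "easy offending", "sporadic weeping spells", "seeking consolation and sympathy", "loss of sexual desire", "depression triggered after childbirth"]),
  ("cimicifuga racemosa", ["post-childbirth depression", "extreme sadness", "darkness symptoms", "exhaustion", "excessive talking", "indifferent behavior", "fear of death", "fear of mental insanity"]),
  ("lachesis", ["depression with delusion", "psychotic depression", "sadness", "feelings of abandonment", "excessive talkativeness", "delusions", "frequent switching of subjects", "violent anger", "madness", "delusions causing suspicion", "fear of harm", "restlessness", "aversion to work", "evasion from the world"]),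
  ("coffea crude", ["manages sleeplessness", "constant thoughts leading to sleeplessness", "nighttime restlessness", "tossing and turning", "mood changes", "irritability", "anxiety", "weeping", "weakness"]),
  ("arsenic album", ["anxiety and sadness", "accompany sadness", "anxiety about health and future", "intense restlessness", "marked weakness", "fears of disease", "financial loss", "loneliness", "death"])]

lemma pvRemAB : pvRemediesA = pvRemediesB.map (fun p => (p.1, PySem.Set.ofList p.2)) := by rfl

lemma pvOrder_eq : pvOrder = pvRemediesB.map (fun p => p.1) := by rfl

set_option maxRecDepth 10000 in
lemma pvNodupSyms : ∀ p ∈ pvRemediesB, p.2.Nodup := by decide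

set_option maxRecDepth 10000 in
lemma pvRows : ∀ p ∈ pvRemediesB,
    pvTable.filter (fun q => q.2 == p.1) = p.2.map (fun s => (s, p.1)) := by decide

-- symmetric counting over two duplicate-free lists
lemma pvCountSym (l₁ l₂ : List String) (h₁ : l₁.Nodup) (h₂ : l₂.Nodup) :
    l₁.countP (fun x => decide (x ∈ l₂)) = l₂.countP (fun x => decide (x ∈ l₁)) := by
  rw [List.countP_eq_length_filter, List.countP_eq_length_filter]
  refine List.Perm.length_eq ?_
  rw [List.perm_ext_iff_of_nodup (h₁.filter _) (h₂.filter _)]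
  intro a
  simp only [List.mem_filter, decide_eq_true_eq]
  exact ⟨fun h => ⟨h.2, h.1⟩, fun h => ⟨h.2, h.1⟩⟩

-- A's per-remedy match count, in countP form
lemma pvCountA (sel L : List String) :
    PySem.Set.len (PySem.Set.inter (PySem.Set.ofList sel) (PySem.Set.ofList L))
      = ((PySem.List.dedup sel).countP (fun s => decide (s ∈ L)) : Int) := by
  simp [PySem.Set.len, PySem.Set.inter, PySem.List.dedup_eq_ofList, List.countP_eq_length_filter]

-- B's per-remedy hit count equals the same countP
lemma pvCountRow (c : String × String → Bool) (r : String) :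
    ∀ l : List (String × String),
      ((l.filter c).map (fun q => q.2)).count r = (l.filter (fun q => q.2 == r)).countP c := by
  intro l
  induction l with
  | nil => rfl
  | cons q l ih =>
    by_cases hc : c q = true <;> by_cases hr : (q.2 == r) = true <;>
      simp [hc, hr, List.count_cons, ih]

lemma pvCountB (sel : List String) (p : String × List String) (hp : p ∈ pvRemediesB) :
    ((PySem.List.count
        ((pvTable.filter (fun pair => PySem.Set.contains (PySem.Set.ofList sel) pair.1)).map
          (fun pair => pair.2)) p.1 : Int))
      = ((PySem.List.dedup sel).countP (fun s => decide (s ∈ p.2)) : Int) := by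
  have hcnt : (((pvTable.filter (fun pair => PySem.Set.contains (PySem.Set.ofList sel) pair.1)).map
          (fun pair => pair.2)).count p.1)
      = (PySem.List.dedup sel).countP (fun s => decide (s ∈ p.2)) := by
    rw [pvCountRow _ _ pvTable, pvRows p hp, List.countP_map]
    have hpred : ((fun pair => PySem.Set.contains (PySem.Set.ofList sel) pair.1) ∘ (fun s => (s, p.1)))
        = (fun s => decide (s ∈ PySem.List.dedup sel)) := by
      funext s
      simp [PySem.List.dedup_eq_ofList]
    rw [hpred, pvCountSym p.2 (PySem.List.dedup sel) (pvNodupSyms p hp) (PySem.List.nodup_dedup sel)]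
  rw [PySem.List.count_eq, hcnt]

-- the recursive scan computes the first-wins strict-> fold
lemma pvScanB_eq_foldl (hits : List String) :
    ∀ (l : List String) (best : String) (bn : Int),
      pvScanB hits l best bn
        = (l.foldl (fun (a : String × Int) nm =>
            if ((PySem.List.count hits nm : Int)) > a.2
            then (nm, (PySem.List.count hits nm : Int)) else a) (best, bn)).1 := by
  intro l
  induction l with
  | nil => intro best bn; rfl
  | cons nm l ih =>
    intro best bn
    simp only [pvScanB, List.foldl_cons]
    by_cases h : ((PySem.List.count hits nm : Int)) > bn
    · simp only [h, if_pos]; exact ih nm _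
    · simp only [h, ite_false]; exact ih best bn

-- generic: the Option-accumulator scan (A) and the String-accumulator scan (B) run in parallel
lemma pvScan (cnt : String × List String → Int) (fb : String) :
    ∀ (l : List (String × List String)) (o : Option String) (m : Int),
    l.foldl (fun (a : String × Int) p => if cnt p > a.2 then (p.1, cnt p) else a) (o.getD fb, m)
      = ((l.foldl (fun (a : Option String × Int) p => if cnt p > a.2 then (some p.1, cnt p) else a) (o, m)).1.getD fb,
         (l.foldl (fun (a : Option String × Int) p => if cnt p > a.2 then (some p.1, cnt p) else a) (o, m)).2) := by
  intro l
  induction l with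
  | nil => simp
  | cons p l ih =>
    intro o m
    simp only [List.foldl_cons]
    by_cases h : cnt p > m
    · simpa [h] using ih (some p.1) (cnt p)
    · simpa [h] using ih o m

-- the final scans, with the match on the Option result folded in
lemma pvFinal (cnt : String × List String → Int) (fb : String) (l : List (String × List String)) :
    (match (l.foldl (fun (a : Option String × Int) p => if cnt p > a.2 then (some p.1, cnt p) else a) (none, 0)).1 with
     | some best => best
     | none => fb)
      = (l.foldl (fun (a : String × Int) p => if cnt p > a.2 then (p.1, cnt p) else a) (fb, 0)).1 := by
  have h := pvScan cnt fb l none 0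
  simp only [Option.getD_none] at h
  rw [h]
  cases (l.foldl (fun (a : Option String × Int) p => if cnt p > a.2 then (some p.1, cnt p) else a) (none, 0)).1 <;> rfl

lemma pvMain (sel : List String) : find_remedy sel = find_remedy_alt sel := by
  unfold find_remedy find_remedy_alt
  rw [pvScanB_eq_foldl]
  simp only [pvOrder_eq, pvRemAB, List.foldl_map]
  rw [PySem.List.foldl_congr_mem pvRemediesB _
      (fun (a : Option String × Int) p =>
        if ((PySem.List.dedup sel).countP (fun s => decide (s ∈ p.2)) : Int) > a.2
        then (some p.1, ((PySem.List.dedup sel).countP (fun s => decide (s ∈ p.2)) : Int)) else a)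
      (none, 0)
      (by intro a p hp; rw [pvCountA sel p.2]),
    PySem.List.foldl_congr_mem pvRemediesB _
      (fun (a : String × Int) p =>
        if ((PySem.List.dedup sel).countP (fun s => decide (s ∈ p.2)) : Int) > a.2
        then (p.1, ((PySem.List.dedup sel).countP (fun s => decide (s ∈ p.2)) : Int)) else a)
      ("Remedy not found for the given signs and symptoms.", 0)
      (by intro a p hp; rw [pvCountB sel p hp])]
  exact pvFinal (fun p => ((PySem.List.dedup sel).countP (fun s => decide (s ∈ p.2)) : Int))
    "Remedy not found for the given signs and symptoms." pvRemediesB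

-- ===== VERDICT (by name: the statement is the Claim_ definition above) =====
theorem find_remedy_spec : Claim_equal_find_remedy := by
  intro sel _
  unfold Spec_find_remedy
  exact pvMain sel
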